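-- pv_equiv track=rewrite | github.com/ArkadyBIG/chequeProgram | Parser/default_parser_methods/parse_bank_details.py | get_gaps_positions
-- ===== SOURCE A (Python) =====
-- def get_gaps_positions(blank_positions):
--     max_step = 2
--     gaps = [[blank_positions[0]]]
--     for i in range(1, len(blank_positions)):
--         if abs(blank_positions[i - 1] - blank_positions[i]) <= max_step:
--             gaps[-1].append(blank_positions[i])
--         else:
--             gaps.append([blank_positions[i]])
--
--     gaps = [(g[0], g[-1]) for g in gaps if len(g) > 1]
--     gaps = sorted(gaps, key=lambda x: x[-1] - x[0], reverse=1)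
--     return gaps
-- ===== SOURCE B (Python) =====
-- def get_gaps_positions(blank_positions):
--     # Boundary-test pipeline: compute the cut flags between neighbours once,
--     # then read off run starts and run ends as two independent filtered lists
--     # and zip them; no sequential grouping state at all.
--     cuts = [abs(a - b) > 2 for a, b in zip(blank_positions, blank_positions[1:])]
--     startf = [True] + cuts
--     endf = cuts + [True]
--     # a start carries the flag "its run has more than one element" = not also an end
--     starts = [(x, not e) for x, s, e in zip(blank_positions, startf, endf) if s]
--     ends = [x for x, s, e in zip(blank_positions, startf, endf) if e]
--     pairs = [(a, b) for (a, keep), b in zip(starts, ends) if keep]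
--     # ascending by first-last == descending by last-first, same stable tie order
--     return sorted(pairs, key=lambda p: p[0] - p[1])
-- ===== Notes on version B (the rewrite author's own statement) =====
-- stated objective: alternative
-- what changed: Replaces A's sequential grouping loop (growing a list of run lists, then a filter/map comprehension and a reverse sort) by a stateless boundary-test pipeline: one pass computes the neighbour cut flags, run starts and run ends are then two independent filtered lists zipped into (first,last) pairs, sorted ascending by first-last instead of descending by last-first.
import Mathlib
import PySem

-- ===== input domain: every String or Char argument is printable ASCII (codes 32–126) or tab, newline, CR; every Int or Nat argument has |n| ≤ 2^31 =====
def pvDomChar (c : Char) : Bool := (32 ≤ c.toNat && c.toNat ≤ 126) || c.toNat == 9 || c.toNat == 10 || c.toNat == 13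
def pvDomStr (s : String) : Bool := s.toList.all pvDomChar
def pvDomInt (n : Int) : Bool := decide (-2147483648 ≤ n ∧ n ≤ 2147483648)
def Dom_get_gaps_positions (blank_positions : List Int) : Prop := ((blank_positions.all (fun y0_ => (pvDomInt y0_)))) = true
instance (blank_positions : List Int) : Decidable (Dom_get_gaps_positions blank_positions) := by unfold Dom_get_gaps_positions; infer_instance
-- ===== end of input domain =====

-- B replaces A's sequential grouping of runs by a stateless boundary-flag pipeline
-- (cut flags, then independent start/end lists zipped); same return value on every
-- non-empty list (A raises IndexError on []).

-- ===== PORT A =====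
-- gaps[-1].append(x) on the (always non-empty) list of groups
def pvAppendLast : List (List Int) → Int → List (List Int)
  | [], x => [[x]]
  | [g], x => [g ++ [x]]
  | g :: gs, x => g :: pvAppendLast gs x

def get_gaps_positions (blank_positions : List Int) : List (Int × Int) :=
  match PySem.List.pyGet? blank_positions 0 with
  | none => []  -- blank_positions[0] raises IndexError; excluded by Pre_
  | some x0 =>
    let gaps := (PySem.List.pyRange 1 (blank_positions.length : Int)).foldl
      (fun gaps i =>
        if |PySem.List.pyGetD blank_positions (i - 1) 0 - PySem.List.pyGetD blank_positions i 0| ≤ 2 then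
          pvAppendLast gaps (PySem.List.pyGetD blank_positions i 0)
        else
          gaps ++ [[PySem.List.pyGetD blank_positions i 0]])
      [[x0]]
    let pairs := (gaps.filter (fun g => decide (1 < g.length))).map
      (fun g => (PySem.List.pyGetD g 0 0, PySem.List.pyGetD g (-1) 0))
    PySem.List.sorted pairs (fun p => p.2 - p.1) true

-- ===== PORT B =====
def get_gaps_positions_alt (blank_positions : List Int) : List (Int × Int) :=
  -- cuts = [abs(a-b) > 2 for a, b in zip(bp, bp[1:])]   (bp[1:] = drop 1)
  let cuts := (blank_positions.zip (blank_positions.drop 1)).map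
    (fun p => decide (2 < |p.1 - p.2|))
  let startf := true :: cuts
  let endf := cuts ++ [true]
  -- zip(bp, startf, endf) as nested zip
  let trip := blank_positions.zip (startf.zip endf)
  let starts := (trip.filter (fun q => q.2.1)).map (fun q => (q.1, !q.2.2))
  let ends := (trip.filter (fun q => q.2.2)).map (fun q => q.1)
  let pairs := ((starts.zip ends).filter (fun q => q.1.2)).map (fun q => (q.1.1, q.2))
  PySem.List.sorted pairs (fun p => p.1 - p.2) false

-- ===== PRECONDITION & SPEC =====
-- Pre_ excludes only the empty list, on which Python A raises IndexError.
def Pre_get_gaps_positions (blank_positions : List Int) : Prop := blank_positions ≠ []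
instance (blank_positions : List Int) : Decidable (Pre_get_gaps_positions blank_positions) := by unfold Pre_get_gaps_positions; infer_instance
def pvWitness_get_gaps_positions : List Int := [1, 2, 10, 11, 30]

def Spec_get_gaps_positions (blank_positions : List Int) (out : List (Int × Int)) : Prop := out = get_gaps_positions_alt blank_positions
instance (blank_positions : List Int) (out : List (Int × Int)) : Decidable (Spec_get_gaps_positions blank_positions out) := by unfold Spec_get_gaps_positions; infer_instance

-- ===== CLAIM (what is proved, stated in full; the proofs are below) =====
def Claim_equal_get_gaps_positions : Prop := ∀ (blank_positions : List Int), Dom_get_gaps_positions blank_positions → Pre_get_gaps_positions blank_positions → Spec_get_gaps_positions blank_positions (get_gaps_positions blank_positions)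

-- ===== LEMMAS AND PROOFS =====

-- the grouping A computes: maximal runs of step ≤ 2, structurally
def pvChunks (x : Int) : List Int → List (List Int)
  | [] => [[x]]
  | y :: t =>
    if |x - y| ≤ 2 then
      match pvChunks y t with
      | g :: r => (x :: g) :: r
      | [] => [[x]]
    else [x] :: pvChunks y t

lemma pvChunks_shape (x : Int) (t : List Int) : ∃ g r, pvChunks x t = (x :: g) :: r := by
  induction t generalizing x with
  | nil => exact ⟨[], [], rfl⟩
  | cons y t ih =>
    obtain ⟨g, r, h⟩ := ih y
    by_cases hc : |x - y| ≤ 2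
    · exact ⟨y :: g, r, by simp [pvChunks, hc, h]⟩
    · exact ⟨[], pvChunks y t, by simp [pvChunks, hc]⟩

lemma pvChunks_ne_nil (x : Int) (t : List Int) : ∀ g ∈ pvChunks x t, g ≠ [] := by
  induction t generalizing x with
  | nil => intro g hg; simp [pvChunks] at hg; simp [hg]
  | cons y t ih =>
    intro g hg
    obtain ⟨g0, r0, h0⟩ := pvChunks_shape y t
    by_cases hc : |x - y| ≤ 2
    · rw [pvChunks, if_pos hc, h0] at hg
      rcases List.mem_cons.1 hg with h | h
      · simp [h]
      · exact ih y g (by rw [h0]; exact List.mem_cons_of_mem _ h)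
    · rw [pvChunks, if_neg hc] at hg
      rcases List.mem_cons.1 hg with h | h
      · simp [h]
      · exact ih y g h

-- A's pair comprehension over a list of groups
def pvPairsOf (gs : List (List Int)) : List (Int × Int) :=
  (gs.filter (fun g => decide (1 < g.length))).map
    (fun g => (PySem.List.pyGetD g 0 0, PySem.List.pyGetD g (-1) 0))

def pvStepA (s : List (List Int)) (p : Int × Int) : List (List Int) :=
  if |p.1 - p.2| ≤ 2 then pvAppendLast s p.2 else s ++ [[p.2]]

def pvAttach (g : List Int) : List (List Int) → List (List Int)
  | [] => []
  | h :: r => (g ++ h) :: r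

lemma pvAppendLast_snoc : ∀ (acc : List (List Int)) (u : List Int) (y : Int),
    pvAppendLast (acc ++ [u]) y = acc ++ [u ++ [y]]
  | [], _, _ => rfl
  | [_], _, _ => rfl
  | _ :: b :: acc, u, y => by
    simpa [pvAppendLast] using pvAppendLast_snoc (b :: acc) u y

lemma pyGetD_neg_one (y : Int) (g : List Int) :
    PySem.List.pyGetD (y :: g) (-1) 0 = (y :: g).getLastD 0 := by
  have h1 : PySem.List.pyIdx? (g.length + 1) (-1) = some g.length := by
    simp only [PySem.List.pyIdx?]
    rw [if_neg (by norm_num), if_pos (by push_cast; omega)]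
    norm_num
  simp [PySem.List.pyGetD, PySem.List.pyGet?, h1, List.getLastD_eq_getLast?,
    List.getLast?_eq_getElem?]

lemma pyGetD_nat (bp : List Int) (j : Nat) (h : j < bp.length) :
    PySem.List.pyGetD bp (j : Int) 0 = bp[j] := by
  rw [PySem.List.pyGetD_eq_getElem bp 0 (by positivity) (by exact_mod_cast h)]
  simp

-- the index pairs (bp[i-1], bp[i]) for i in range(1, len(bp)) are zip(bp, bp[1:])
lemma pyIdxPairs_eq_zip (bp : List Int) :
    (PySem.List.pyRange 1 (bp.length : Int)).map
      (fun i => (PySem.List.pyGetD bp (i - 1) 0, PySem.List.pyGetD bp i 0)) = bp.zip bp.tail := by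
  apply List.ext_getElem
  · simp [PySem.List.pyRange]
    omega
  · intro j h1 h2
    have hj : j + 1 < bp.length := by
      simp only [List.length_zip, List.length_tail] at h2; omega
    have e1 : (1 : Int) + 1 * (j : Int) - 1 = ((j : Nat) : Int) := by ring
    have e2 : (1 : Int) + 1 * (j : Int) = (((j + 1) : Nat) : Int) := by push_cast; ring
    simp only [PySem.List.pyRange, List.getElem_map, List.getElem_zip]
    simp only [if_neg (one_ne_zero), List.getElem_map, List.getElem_range]
    rw [e1, e2, pyGetD_nat bp j (by omega), pyGetD_nat bp (j + 1) hj]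
    simp [List.getElem_tail]

lemma pvAttach_nil (x : Int) (t : List Int) : pvAttach [] (pvChunks x t) = pvChunks x t := by
  obtain ⟨g, r, h⟩ := pvChunks_shape x t
  simp [h, pvAttach]

lemma foldA_attach : ∀ (t : List Int) (x : Int) (acc : List (List Int)) (g : List Int),
    ((x :: t).zip t).foldl pvStepA (acc ++ [g ++ [x]]) = acc ++ pvAttach g (pvChunks x t) := by
  intro t
  induction t with
  | nil => intro x acc g; simp [pvChunks, pvAttach]
  | cons y t ih =>
    intro x acc g
    by_cases hc : |x - y| ≤ 2
    · have h1 : pvStepA (acc ++ [g ++ [x]]) (x, y) = acc ++ [(g ++ [x]) ++ [y]] := by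
        dsimp only [pvStepA]
        rw [if_pos hc, pvAppendLast_snoc]
      obtain ⟨g0, r0, h0⟩ := pvChunks_shape y t
      calc ((x :: y :: t).zip (y :: t)).foldl pvStepA (acc ++ [g ++ [x]])
          = ((y :: t).zip t).foldl pvStepA (acc ++ [(g ++ [x]) ++ [y]]) := by
            rw [List.zip_cons_cons, List.foldl_cons, h1]
        _ = acc ++ pvAttach (g ++ [x]) (pvChunks y t) := ih y acc (g ++ [x])
        _ = acc ++ pvAttach g (pvChunks x (y :: t)) := by
            simp [pvChunks, hc, h0, pvAttach]
    · have h1 : pvStepA (acc ++ [g ++ [x]]) (x, y) = (acc ++ [g ++ [x]]) ++ [[] ++ [y]] := by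
        dsimp only [pvStepA]
        rw [if_neg hc]
        simp
      obtain ⟨g0, r0, h0⟩ := pvChunks_shape y t
      calc ((x :: y :: t).zip (y :: t)).foldl pvStepA (acc ++ [g ++ [x]])
          = ((y :: t).zip t).foldl pvStepA ((acc ++ [g ++ [x]]) ++ [[] ++ [y]]) := by
            rw [List.zip_cons_cons, List.foldl_cons, h1]
        _ = (acc ++ [g ++ [x]]) ++ pvAttach [] (pvChunks y t) := ih y (acc ++ [g ++ [x]]) []
        _ = acc ++ pvAttach g (pvChunks x (y :: t)) := by
            simp [pvChunks, hc, pvAttach, h0]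

lemma gapsA (x : Int) (t : List Int) :
    (PySem.List.pyRange 1 (((x :: t) : List Int).length : Int)).foldl
      (fun gaps i =>
        if |PySem.List.pyGetD (x :: t) (i - 1) 0 - PySem.List.pyGetD (x :: t) i 0| ≤ 2 then
          pvAppendLast gaps (PySem.List.pyGetD (x :: t) i 0)
        else
          gaps ++ [[PySem.List.pyGetD (x :: t) i 0]])
      [[x]] = pvChunks x t := by
  have hm := pyIdxPairs_eq_zip (x :: t)
  simp only [List.tail_cons] at hm
  calc (PySem.List.pyRange 1 (((x :: t) : List Int).length : Int)).foldl
        (fun gaps i =>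
          if |PySem.List.pyGetD (x :: t) (i - 1) 0 - PySem.List.pyGetD (x :: t) i 0| ≤ 2 then
            pvAppendLast gaps (PySem.List.pyGetD (x :: t) i 0)
          else
            gaps ++ [[PySem.List.pyGetD (x :: t) i 0]])
        [[x]]
      = ((x :: t).zip t).foldl pvStepA [[x]] := by
        rw [← hm, List.foldl_map]
        rfl
    _ = pvChunks x t := by
        simpa [pvAttach_nil] using foldA_attach t x [] []

lemma pairsOf_cons (g : List Int) (r : List (List Int)) :
    pvPairsOf (g :: r) =
      (if 1 < g.length then [(PySem.List.pyGetD g 0 0, PySem.List.pyGetD g (-1) 0)] else []) ++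
        pvPairsOf r := by
  by_cases h : 1 < g.length <;> simp [pvPairsOf, h]

lemma A_eq (x : Int) (t : List Int) :
    get_gaps_positions (x :: t) =
      PySem.List.sorted (pvPairsOf (pvChunks x t)) (fun p => p.2 - p.1) true := by
  have hget : PySem.List.pyGet? (x :: t) 0 = some x := by
    have h0 : PySem.List.pyIdx? (t.length + 1) 0 = some 0 := by
      simp only [PySem.List.pyIdx?]
      rw [if_pos le_rfl, if_pos (by push_cast; omega)]
      rfl
    simp [PySem.List.pyGet?, h0]
  unfold get_gaps_positions
  rw [hget]
  simp only []
  rw [gapsA]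
  rfl

-- ---------- B side ----------

-- the cut flags between neighbours, structurally
def pvCuts (x : Int) : List Int → List Bool
  | [] => []
  | y :: t => decide (2 < |x - y|) :: pvCuts y t

-- the zip3(bp, startf, endf) list, with the head start flag generalized to b
def pvTrip (b : Bool) (x : Int) : List Int → List (Int × Bool × Bool)
  | [] => [(x, b, true)]
  | y :: t => (x, b, decide (2 < |x - y|)) :: pvTrip (decide (2 < |x - y|)) y t

lemma cuts_eq (x : Int) (t : List Int) :
    ((x :: t).zip t).map (fun p => decide (2 < |p.1 - p.2|)) = pvCuts x t := by
  induction t generalizing x with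
  | nil => rfl
  | cons y t ih => simp [pvCuts, ← ih y]

lemma trip_eq (b : Bool) (x : Int) (t : List Int) :
    (x :: t).zip ((b :: pvCuts x t).zip (pvCuts x t ++ [true])) = pvTrip b x t := by
  induction t generalizing b x with
  | nil => rfl
  | cons y t ih => simp [pvCuts, pvTrip, ← ih (decide (2 < |x - y|)) y]

lemma ends_eq (b : Bool) (x : Int) (t : List Int) :
    ((pvTrip b x t).filter (fun q => q.2.2)).map (fun q => q.1) =
      (pvChunks x t).map (fun g => g.getLastD 0) := by
  induction t generalizing b x with
  | nil => simp [pvTrip, pvChunks]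
  | cons y t ih =>
    obtain ⟨g0, r0, h0⟩ := pvChunks_shape y t
    by_cases hc : |x - y| ≤ 2
    · have hd : decide (2 < |x - y|) = false := by simp; omega
      have hx : pvChunks x (y :: t) = (x :: y :: g0) :: r0 := by
        simp [pvChunks, hc, h0]
      rw [pvTrip, hd, hx]
      simp [ih false y, h0]
    · have hd : decide (2 < |x - y|) = true := by simp; omega
      have hx : pvChunks x (y :: t) = [x] :: pvChunks y t := by
        simp [pvChunks, hc]
      rw [pvTrip, hd, hx]
      simp [ih true y]

lemma starts_eq (b : Bool) (x : Int) (t : List Int) :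
    ((pvTrip b x t).filter (fun q => q.2.1)).map (fun q => (q.1, !q.2.2)) =
      (if b then pvChunks x t else (pvChunks x t).tail).map
        (fun g => (g.headD 0, decide (1 < g.length))) := by
  induction t generalizing b x with
  | nil => cases b <;> simp [pvTrip, pvChunks]
  | cons y t ih =>
    obtain ⟨g0, r0, h0⟩ := pvChunks_shape y t
    by_cases hc : |x - y| ≤ 2
    · have hd : decide (2 < |x - y|) = false := by simp; omega
      have hx : pvChunks x (y :: t) = (x :: y :: g0) :: r0 := by
        simp [pvChunks, hc, h0]
      rw [pvTrip, hd, hx]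
      cases b with
      | false => simp [ih false y, h0]
      | true => simp [ih false y, h0]
    · have hd : decide (2 < |x - y|) = true := by simp; omega
      have hx : pvChunks x (y :: t) = [x] :: pvChunks y t := by
        simp [pvChunks, hc]
      rw [pvTrip, hd, hx]
      cases b with
      | false => simp [ih true y]
      | true => simp [ih true y]

lemma zipmap_pairs : ∀ (gs : List (List Int)), (∀ g ∈ gs, g ≠ []) →
    (((gs.map (fun g => ((g.headD 0 : Int), decide (1 < g.length)))).zip
        (gs.map (fun g => g.getLastD 0))).filter (fun q => q.1.2)).map
      (fun q => (q.1.1, q.2)) = pvPairsOf gs := by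
  intro gs
  induction gs with
  | nil => intro _; rfl
  | cons g r ih =>
    intro hne
    obtain ⟨z, gz, rfl⟩ : ∃ z gz, g = z :: gz := by
      cases g with
      | nil => exact absurd rfl (hne [] (List.mem_cons_self))
      | cons z gz => exact ⟨z, gz, rfl⟩
    have hr := ih (fun g hg => hne g (List.mem_cons_of_mem _ hg))
    rw [pairsOf_cons]
    simp only [List.map_cons, List.zip_cons_cons, List.filter_cons]
    by_cases h : 1 < (z :: gz).length
    · rw [if_pos (by simpa using h), if_pos h, List.map_cons, hr]
      simp [pyGetD_neg_one, List.getLastD_eq_getLast?]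
    · rw [if_neg (by simpa using h), if_neg h, hr]
      simp

lemma sort_flip (xs : List (Int × Int)) :
    PySem.List.sorted xs (fun p => p.2 - p.1) true =
      PySem.List.sorted xs (fun p => p.1 - p.2) false := by
  unfold PySem.List.sorted
  have hb : (if (true : Bool) = true then
        fun (a b : Int × Int) => decide (b.2 - b.1 < a.2 - a.1)
      else fun a b => decide (a.2 - a.1 < b.2 - b.1)) =
      (if (false : Bool) = true then
        fun (a b : Int × Int) => decide (b.1 - b.2 < a.1 - a.2)
      else fun a b => decide (a.1 - a.2 < b.1 - b.2)) := by
    simp only [if_neg Bool.false_ne_true]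
    funext a b
    simp [decide_eq_decide]
    omega
  rw [hb]

lemma B_eq (x : Int) (t : List Int) :
    get_gaps_positions_alt (x :: t) =
      PySem.List.sorted (pvPairsOf (pvChunks x t)) (fun p => p.1 - p.2) false := by
  unfold get_gaps_positions_alt
  simp only [List.drop_one, List.tail_cons]
  rw [cuts_eq, trip_eq, starts_eq, ends_eq, if_pos rfl,
    zipmap_pairs (pvChunks x t) (pvChunks_ne_nil x t)]

-- ===== VERDICT (by name: the statement is the Claim_ definition above) =====
theorem get_gaps_positions_spec : Claim_equal_get_gaps_positions := by
  intro bp _ hpre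
  unfold Spec_get_gaps_positions
  cases bp with
  | nil => exact absurd rfl hpre
  | cons x t => rw [A_eq, B_eq, sort_flip]
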